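-- pv_equiv track=rewrite | github.com/kongshifer/strack | tools/pack_input.py | tokenize_zone
-- ===== SOURCE A (Python) =====
-- def tokenize_zone(expr: str) -> list[str]:
--     tokens: list[str] = []
--     current = []
--     special = {"(", ")", "|", "~"}
--     for char in expr:
--         if char in special:
--             if current:
--                 tokens.append("".join(current))
--                 current = []
--             tokens.append(char)
--         elif char.isspace():
--             if current:
--                 tokens.append("".join(current))
--                 current = []
--         else:
--             current.append(char)
--     if current:
--         tokens.append("".join(current))
--
--     expanded: list[str] = []
--     prev: str | None = None
--     for token in tokens:
--         if prev is not None: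
--             left_is_value = prev not in {"|", "(", "~"}
--             right_is_value = token not in {"|", ")"} and token != "~"
--             left_can_close = prev == ")" or left_is_value
--             right_can_open = token == "(" or token == "~" or right_is_value
--             if left_can_close and right_can_open:
--                 expanded.append("AND")
--         if token == "|":
--             expanded.append("OR")
--         elif token == "~":
--             expanded.append("NOT")
--         else:
--             expanded.append(token)
--         prev = token
--     return expanded
-- ===== SOURCE B (Python) =====
-- def tokenize_zone(expr: str) -> list[str]:
--     out: list[str] = []
--     cur: list[str] = []
--     prev: str | None = None
--
--     def emit(tok: str) -> None:
--         nonlocal prev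
--         if prev is not None:
--             # p can close on the left, tok can open on the right
--             if prev not in ("|", "(", "~") and tok not in ("|", ")"):
--                 out.append("AND")
--         out.append("OR" if tok == "|" else "NOT" if tok == "~" else tok)
--         prev = tok
--
--     for ch in expr:
--         if ch in ("(", ")", "|", "~"):
--             if cur:
--                 emit("".join(cur))
--                 cur = []
--             emit(ch)
--         elif ch.isspace():
--             if cur:
--                 emit("".join(cur))
--                 cur = []
--         else:
--             cur.append(ch)
--     if cur:
--         emit("".join(cur))
--     return out
-- ===== Notes on version B (the rewrite author's own statement) =====
-- stated objective: simpler
-- what changed: Single fused pass over the characters that emits mapped tokens and implicit ANDs immediately (tracking only the previous raw token, with the AND predicate simplified to its equivalent two-membership form), instead of A's two phases that first materialize a token list and then expand it.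
import Mathlib
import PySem

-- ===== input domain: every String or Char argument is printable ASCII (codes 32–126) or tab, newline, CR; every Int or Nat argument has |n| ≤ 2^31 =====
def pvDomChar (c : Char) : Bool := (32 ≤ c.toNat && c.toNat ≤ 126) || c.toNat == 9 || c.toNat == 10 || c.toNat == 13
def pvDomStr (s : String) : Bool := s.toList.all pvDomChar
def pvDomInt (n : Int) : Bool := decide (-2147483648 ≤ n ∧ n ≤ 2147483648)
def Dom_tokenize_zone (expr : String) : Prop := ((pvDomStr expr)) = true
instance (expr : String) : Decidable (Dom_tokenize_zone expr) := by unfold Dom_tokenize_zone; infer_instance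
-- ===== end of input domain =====

-- B is a single fused pass (scan chars, emit mapped tokens and implicit ANDs immediately,
-- tracking only the previous raw token); A builds a token list first and expands it in a second pass.

-- ===== PORT A =====
def tzSpecial (c : Char) : Bool := c == '(' || c == ')' || c == '|' || c == '~'

-- first loop of A: (tokens, current) state
def tzStep1 (st : List String × List Char) (c : Char) : List String × List Char :=
  if tzSpecial c then
    let tokens := if st.2.isEmpty then st.1 else st.1 ++ [String.ofList st.2]
    (tokens ++ [String.ofList [c]], [])
  else if PySem.Chars.isspace c then
    if st.2.isEmpty then st else (st.1 ++ [String.ofList st.2], [])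
  else (st.1, st.2 ++ [c])

-- second loop of A: (expanded, prev) state
def tzStep2 (st : List String × Option String) (token : String) : List String × Option String :=
  let expanded :=
    match st.2 with
    | none => st.1
    | some prev =>
      let left_is_value := !(prev == "|" || prev == "(" || prev == "~")
      let right_is_value := !(token == "|" || token == ")") && !(token == "~")
      let left_can_close := prev == ")" || left_is_value
      let right_can_open := token == "(" || token == "~" || right_is_value
      if left_can_close && right_can_open then st.1 ++ ["AND"] else st.1
  let expanded :=
    if token == "|" then expanded ++ ["OR"]
    else if token == "~" then expanded ++ ["NOT"]
    else expanded ++ [token]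
  (expanded, some token)

def tokenize_zone (expr : String) : List String :=
  let st := expr.toList.foldl tzStep1 ([], [])
  let tokens := if st.2.isEmpty then st.1 else st.1 ++ [String.ofList st.2]
  (tokens.foldl tzStep2 ([], none)).1

-- ===== PORT B =====
def tzMap (tok : String) : String :=
  if tok == "|" then "OR" else if tok == "~" then "NOT" else tok

def tzCanAnd (p tok : String) : Bool :=
  !(p == "|" || p == "(" || p == "~") && !(tok == "|" || tok == ")")

-- B's emit helper: appends the optional "AND" and the mapped token, updates prev
def tzEmit (out : List String) (prev : Option String) (tok : String) :
    List String × Option String :=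
  let out :=
    match prev with
    | none => out
    | some p => if tzCanAnd p tok then out ++ ["AND"] else out
  (out ++ [tzMap tok], some tok)

def tzAltStep (st : List String × List Char × Option String) (c : Char) :
    List String × List Char × Option String :=
  if ['(', ')', '|', '~'].contains c then
    let (out, prev) :=
      if st.2.1.isEmpty then (st.1, st.2.2)
      else tzEmit st.1 st.2.2 (String.ofList st.2.1)
    let (out, prev) := tzEmit out prev (String.ofList [c])
    (out, [], prev)
  else if PySem.Chars.isspace c then
    if st.2.1.isEmpty then st
    else
      let (out, prev) := tzEmit st.1 st.2.2 (String.ofList st.2.1)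
      (out, [], prev)
  else (st.1, st.2.1 ++ [c], st.2.2)

def tokenize_zone_alt (expr : String) : List String :=
  let st := expr.toList.foldl tzAltStep ([], [], none)
  if st.2.1.isEmpty then st.1 else (tzEmit st.1 st.2.2 (String.ofList st.2.1)).1

-- ===== PRECONDITION & SPEC =====
def Spec_tokenize_zone (expr : String) (out : List String) : Prop := out = tokenize_zone_alt expr
instance (expr : String) (out : List String) : Decidable (Spec_tokenize_zone expr out) := by unfold Spec_tokenize_zone; infer_instance

-- ===== CLAIM (what is proved, stated in full; the proofs are below) =====
def Claim_equal_tokenize_zone : Prop := ∀ (expr : String), Dom_tokenize_zone expr → Spec_tokenize_zone expr (tokenize_zone expr)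

-- ===== LEMMAS AND PROOFS =====

-- proof-side recursive tokenizer (A's first phase, accumulator removed)
def pvTok : List Char → List Char → List String
  | [], cur => if cur.isEmpty then [] else [String.ofList cur]
  | c :: cs, cur =>
    if tzSpecial c then
      (if cur.isEmpty then [] else [String.ofList cur]) ++ String.ofList [c] :: pvTok cs []
    else if PySem.Chars.isspace c then
      (if cur.isEmpty then [] else [String.ofList cur]) ++ pvTok cs []
    else pvTok cs (cur ++ [c])

-- A's per-token output in the second phase
def pvEmitA (prev : Option String) (token : String) : List String :=
  (match prev with
   | none => []
   | some p =>
     if (p == ")" || !(p == "|" || p == "(" || p == "~")) &&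
        (token == "(" || token == "~" ||
          (!(token == "|" || token == ")") && !(token == "~"))) then ["AND"] else []) ++
  [if token == "|" then "OR" else if token == "~" then "NOT" else token]

def pvExp : Option String → List String → List String
  | _, [] => []
  | prev, t :: ts => pvEmitA prev t ++ pvExp (some t) ts

theorem tzStep2_eq (acc : List String) (prev : Option String) (t : String) :
    tzStep2 (acc, prev) t = (acc ++ pvEmitA prev t, some t) := by
  cases prev <;> simp [tzStep2, pvEmitA] <;> split_ifs <;> simp

theorem expA_eq (ts : List String) : ∀ (acc : List String) (prev : Option String),
    (List.foldl tzStep2 (acc, prev) ts).1 = acc ++ pvExp prev ts := by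
  induction ts with
  | nil => intro acc prev; simp [pvExp]
  | cons t ts ih =>
    intro acc prev
    simp [List.foldl, tzStep2_eq, pvExp, ih]

theorem tokA_eq (cs : List Char) : ∀ (acc : List String) (cur : List Char),
    (if (List.foldl tzStep1 (acc, cur) cs).2.isEmpty then
       (List.foldl tzStep1 (acc, cur) cs).1
     else (List.foldl tzStep1 (acc, cur) cs).1 ++
       [String.ofList (List.foldl tzStep1 (acc, cur) cs).2]) = acc ++ pvTok cs cur := by
  induction cs with
  | nil => intro acc cur; by_cases h : cur.isEmpty <;> simp [pvTok, h]
  | cons c cs ih =>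
    intro acc cur
    by_cases hs : tzSpecial c
    · by_cases h : cur.isEmpty <;>
        · simp only [List.foldl, tzStep1, hs, h, if_true, if_false, Bool.false_eq_true,
            ite_true, ite_false]
          rw [ih]
          simp [pvTok, hs, h]
    · by_cases hw : PySem.Chars.isspace c
      · by_cases h : cur.isEmpty
        · simp only [List.foldl, tzStep1, hs, hw, h, Bool.false_eq_true, ite_true, ite_false]
          rw [ih]
          simp [pvTok, hs, hw, h, List.isEmpty_iff.mp h]
        · simp only [List.foldl, tzStep1, hs, hw, h, Bool.false_eq_true, ite_true, ite_false]
          rw [ih]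
          simp [pvTok, hs, hw, h]
      · simp only [List.foldl, tzStep1, hs, hw, Bool.false_eq_true, ite_false]
        rw [ih]
        simp [pvTok, hs, hw]

-- the two forms of the implicit-AND predicate agree
theorem canAnd_eq (p t : String) :
    ((p == ")" || !(p == "|" || p == "(" || p == "~")) &&
      (t == "(" || t == "~" || (!(t == "|" || t == ")") && !(t == "~")))) = tzCanAnd p t := by
  have hl : (p == ")" || !(p == "|" || p == "(" || p == "~")) =
      !(p == "|" || p == "(" || p == "~") := by
    by_cases h : p = ")"
    · subst h; decide
    · have e : (p == ")") = false := beq_eq_false_iff_ne.mpr h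
      rw [e, Bool.false_or]
  have hr : (t == "(" || t == "~" || (!(t == "|" || t == ")") && !(t == "~"))) =
      !(t == "|" || t == ")") := by
    by_cases h1 : t = "("
    · subst h1; decide
    by_cases h2 : t = "~"
    · subst h2; decide
    have e1 : (t == "(") = false := beq_eq_false_iff_ne.mpr h1
    have e2 : (t == "~") = false := beq_eq_false_iff_ne.mpr h2
    rw [e1, e2]
    simp
  rw [hl, hr, tzCanAnd]

theorem emitB_eq (out : List String) (prev : Option String) (tok : String) :
    tzEmit out prev tok = (out ++ pvEmitA prev tok, some tok) := by
  cases prev with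
  | none => simp [tzEmit, pvEmitA, tzMap]
  | some p =>
    simp only [tzEmit, pvEmitA, tzMap, ← canAnd_eq]
    split_ifs <;> simp

theorem tzSpecial_contains (c : Char) : ['(', ')', '|', '~'].contains c = tzSpecial c := by
  simp only [List.contains_cons, List.contains_nil, Bool.or_false, tzSpecial, Bool.or_assoc]

theorem altB_eq (cs : List Char) : ∀ (out : List String) (cur : List Char) (prev : Option String),
    (if (List.foldl tzAltStep (out, cur, prev) cs).2.1.isEmpty then
       (List.foldl tzAltStep (out, cur, prev) cs).1
     else (List.foldl tzAltStep (out, cur, prev) cs).1 ++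
       pvEmitA (List.foldl tzAltStep (out, cur, prev) cs).2.2
         (String.ofList (List.foldl tzAltStep (out, cur, prev) cs).2.1))
    = out ++ pvExp prev (pvTok cs cur) := by
  induction cs with
  | nil =>
    intro out cur prev
    by_cases h : cur.isEmpty <;> simp [pvTok, pvExp, h, emitB_eq]
  | cons c cs ih =>
    intro out cur prev
    by_cases hs : tzSpecial c
    · by_cases h : cur.isEmpty <;>
        · simp only [List.foldl, tzAltStep, tzSpecial_contains, hs, h, emitB_eq, if_true,
            if_false, Bool.false_eq_true, ite_true, ite_false]
          rw [ih]
          simp [pvTok, pvExp, hs, h]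
    · by_cases hw : PySem.Chars.isspace c
      · by_cases h : cur.isEmpty
        · simp only [List.foldl, tzAltStep, tzSpecial_contains, hs, hw, h, emitB_eq,
            Bool.false_eq_true, ite_true, ite_false]
          rw [ih]
          simp [pvTok, pvExp, hs, hw, h, List.isEmpty_iff.mp h]
        · simp only [List.foldl, tzAltStep, tzSpecial_contains, hs, hw, h, emitB_eq,
            Bool.false_eq_true, ite_true, ite_false]
          rw [ih]
          simp [pvTok, pvExp, hs, hw, h]
      · simp only [List.foldl, tzAltStep, tzSpecial_contains, hs, hw, Bool.false_eq_true,
          ite_false]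
        rw [ih]
        simp [pvTok, hs, hw]

-- ===== VERDICT (by name: the statement is the Claim_ definition above) =====
theorem tokenize_zone_spec : Claim_equal_tokenize_zone := by
  intro expr _
  unfold Spec_tokenize_zone
  show tokenize_zone expr = tokenize_zone_alt expr
  simp only [tokenize_zone, tokenize_zone_alt, emitB_eq]
  rw [tokA_eq, expA_eq, altB_eq]
  simp
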